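-- pv_equiv track=rewrite | github.com/az4mary/Deterministic-Amazon-Automation | workflow_orchestrator.py | repair_unescaped_quotes
-- ===== SOURCE A (Python) =====
-- from typing import Any, Callable, Dict, List, Optional
--
-- def repair_unescaped_quotes(json_text: str) -> str:
--     """
--     Best-effort repair for common browser-LLM failures where a quote character
--     appears inside a JSON string value (e.g. inch marks like 2.4") without being escaped.
--     This is a heuristic: treat a quote inside a string as a terminator only if
--     the next non-whitespace character is a valid JSON delimiter.
--     """
--     out: List[str] = []
--     in_string = False
--     escape = False
--
--     for idx, ch in enumerate(json_text):
--         if not in_string: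
--             out.append(ch)
--             if ch == '"':
--                 in_string = True
--             continue
--
--         # in_string
--         if escape:
--             out.append(ch)
--             escape = False
--             continue
--
--         if ch == "\\":
--             out.append(ch)
--             escape = True
--             continue
--
--         if ch == '"':
--             j = idx + 1
--             while j < len(json_text) and json_text[j] in " \t\r\n":
--                 j += 1
--             if j >= len(json_text) or json_text[j] in [",", ":", "}", "]"]:
--                 out.append(ch)
--                 in_string = False
--             else:
--                 out.append('\\"')
--             continue
--
--         out.append(ch)
--
--     return "".join(out)
-- ===== SOURCE B (Python) =====
-- def repair_unescaped_quotes(json_text: str) -> str: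
--     # Precompute nxt[i] = next non-whitespace character at position >= i (None if none),
--     # by one right-to-left scan; then a single forward state-machine pass with no inner loop.
--     n = len(json_text)
--     nxt = [None] * (n + 1)
--     cur = None
--     for i in range(n - 1, -1, -1):
--         c = json_text[i]
--         if c not in " \t\r\n":
--             cur = c
--         nxt[i] = cur
--     out = []
--     in_string = False
--     escape = False
--     for idx, ch in enumerate(json_text):
--         if not in_string:
--             out.append(ch)
--             in_string = ch == '"'
--         elif escape:
--             out.append(ch)
--             escape = False
--         elif ch == "\\":
--             out.append(ch)
--             escape = True
--         elif ch == '"':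
--             sig = nxt[idx + 1]
--             if sig is None or sig in ",:}]":
--                 out.append(ch)
--                 in_string = False
--             else:
--                 out.append('\\"')
--         else:
--             out.append(ch)
--     return "".join(out)
-- ===== Notes on version B (the rewrite author's own statement) =====
-- stated objective: alternative
-- what changed: Replaced A's inner whitespace-skipping scan at each in-string quote by a right-to-left precomputed suffix table of the next non-whitespace character, so the forward state machine does a single O(1) lookup per quote.
import Mathlib
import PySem

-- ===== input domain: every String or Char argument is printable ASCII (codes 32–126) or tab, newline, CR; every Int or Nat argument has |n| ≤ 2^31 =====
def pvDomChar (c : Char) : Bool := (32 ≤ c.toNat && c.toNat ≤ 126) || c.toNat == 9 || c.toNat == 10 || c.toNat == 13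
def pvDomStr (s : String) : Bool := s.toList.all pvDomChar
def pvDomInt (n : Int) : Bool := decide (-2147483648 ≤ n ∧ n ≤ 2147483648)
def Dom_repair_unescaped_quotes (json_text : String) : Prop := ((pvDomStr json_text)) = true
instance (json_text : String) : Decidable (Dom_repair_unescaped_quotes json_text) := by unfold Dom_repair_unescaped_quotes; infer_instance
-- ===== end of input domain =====

-- B replaces A's inner whitespace-skip loop at each quote by a precomputed right-to-left
-- suffix table of the next non-whitespace character (alternative single-pass decomposition).


-- ===== PORT A =====
-- A's inner `while` that skips whitespace, fused with the delimiter test that follows it: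
-- `j = idx+1; while j < len and s[j] in " \t\r\n": j += 1; (j >= len or s[j] in [",",":","}","]"])`
def pvAQuoteClose (full : List Char) (j : Nat) : Bool :=
  if h : j < full.length then
    if (full[j] == ' ' || full[j] == '\t' || full[j] == '\r' || full[j] == '\n') then
      pvAQuoteClose full (j + 1)
    else
      (full[j] == ',' || full[j] == ':' || full[j] == '}' || full[j] == ']')
  else true
termination_by full.length - j

-- the `for idx, ch in enumerate(json_text)` loop, state (out pieces, in_string, escape)
def pvAGo (full : List Char) : List Char → Nat → Bool → Bool → List String
  | [], _, _, _ => []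
  | ch :: rest, idx, inStr, esc =>
    if !inStr then
      ch.toString :: pvAGo full rest (idx + 1) (ch == '"') esc
    else if esc then
      ch.toString :: pvAGo full rest (idx + 1) true false
    else if ch == '\\' then
      ch.toString :: pvAGo full rest (idx + 1) true true
    else if ch == '"' then
      if pvAQuoteClose full (idx + 1) then
        ch.toString :: pvAGo full rest (idx + 1) false false
      else
        "\\\"" :: pvAGo full rest (idx + 1) true false
    else
      ch.toString :: pvAGo full rest (idx + 1) true false

def repair_unescaped_quotes (json_text : String) : String :=
  String.join (pvAGo json_text.toList json_text.toList 0 false false)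

-- ===== PORT B =====
-- right-to-left pass: nxt[i] = next non-whitespace char at position ≥ i (none if no such char)
def pvBNxt : List Char → List (Option Char)
  | [] => [none]
  | c :: rest =>
    let t := pvBNxt rest
    (if (c == ' ' || c == '\t' || c == '\r' || c == '\n') then t.headD none else some c) :: t

def pvBGo (nxt : List (Option Char)) : List Char → Nat → Bool → Bool → List String
  | [], _, _, _ => []
  | ch :: rest, idx, inStr, esc =>
    if !inStr then
      ch.toString :: pvBGo nxt rest (idx + 1) (ch == '"') esc
    else if esc then
      ch.toString :: pvBGo nxt rest (idx + 1) true false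
    else if ch == '\\' then
      ch.toString :: pvBGo nxt rest (idx + 1) true true
    else if ch == '"' then
      match nxt.getD (idx + 1) none with
      | none => ch.toString :: pvBGo nxt rest (idx + 1) false false
      | some sig =>
        if (sig == ',' || sig == ':' || sig == '}' || sig == ']') then
          ch.toString :: pvBGo nxt rest (idx + 1) false false
        else
          "\\\"" :: pvBGo nxt rest (idx + 1) true false
    else
      ch.toString :: pvBGo nxt rest (idx + 1) true false

def repair_unescaped_quotes_alt (json_text : String) : String :=
  String.join (pvBGo (pvBNxt json_text.toList) json_text.toList 0 false false)

-- ===== PRECONDITION & SPEC =====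
def Spec_repair_unescaped_quotes (json_text : String) (out : String) : Prop := out = repair_unescaped_quotes_alt json_text
instance (json_text : String) (out : String) : Decidable (Spec_repair_unescaped_quotes json_text out) := by unfold Spec_repair_unescaped_quotes; infer_instance

-- ===== CLAIM (what is proved, stated in full; the proofs are below) =====
def Claim_equal_repair_unescaped_quotes : Prop := ∀ (json_text : String), Dom_repair_unescaped_quotes json_text → Spec_repair_unescaped_quotes json_text (repair_unescaped_quotes json_text)

-- ===== LEMMAS AND PROOFS =====

def pvSigHead (cs : List Char) (j : Nat) : Option Char :=
  ((cs.drop j).dropWhile (fun c => c == ' ' || c == '\t' || c == '\r' || c == '\n')).head?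

theorem pvAQuoteClose_eq (full : List Char) (j : Nat) :
    pvAQuoteClose full j =
      (match pvSigHead full j with
       | none => true
       | some c => (c == ',' || c == ':' || c == '}' || c == ']')) := by
  rw [pvAQuoteClose]
  split
  · rename_i h
    have hd : full.drop j = full[j] :: full.drop (j + 1) := by
      rw [List.drop_eq_getElem_cons h]
    split
    · rename_i hw
      rw [pvAQuoteClose_eq full (j + 1)]
      unfold pvSigHead
      rw [hd, List.dropWhile_cons, if_pos hw]
    · rename_i hw
      unfold pvSigHead
      rw [hd, List.dropWhile_cons, if_neg hw, List.head?_cons]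
  · rename_i h
    unfold pvSigHead
    rw [List.drop_eq_nil_of_le (by omega), List.dropWhile_nil, List.head?_nil]
termination_by full.length - j

theorem pvBNxt_getD (cs : List Char) (j : Nat) :
    (pvBNxt cs).getD j none = pvSigHead cs j := by
  induction cs generalizing j with
  | nil =>
    cases j <;> simp [pvBNxt, pvSigHead]
  | cons c rest ih =>
    cases j with
    | zero =>
      by_cases hw : (c == ' ' || c == '\t' || c == '\r' || c == '\n') = true
      · simp [pvBNxt, pvSigHead, hw]
        simpa [pvSigHead, List.getD_eq_getElem?_getD, List.head?_eq_getElem?] using ih 0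
      · simp [pvBNxt, pvSigHead, hw]
    | succ j =>
      have : pvSigHead (c :: rest) (j + 1) = pvSigHead rest j := by
        simp [pvSigHead]
      rw [this, ← ih j]
      simp [pvBNxt]

theorem pvGo_eq (full : List Char) (rest : List Char) (idx : Nat) (inStr esc : Bool) :
    pvAGo full rest idx inStr esc = pvBGo (pvBNxt full) rest idx inStr esc := by
  induction rest generalizing idx inStr esc with
  | nil => simp [pvAGo, pvBGo]
  | cons ch rest ih =>
    rw [pvAGo, pvBGo, pvBNxt_getD, pvAQuoteClose_eq]
    cases hs : pvSigHead full (idx + 1) <;>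
      simp only [ih] <;> split_ifs <;> simp_all

theorem repair_unescaped_quotes_spec : Claim_equal_repair_unescaped_quotes := by
  intro s _
  unfold Spec_repair_unescaped_quotes repair_unescaped_quotes repair_unescaped_quotes_alt
  rw [pvGo_eq]
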